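-- pv_equiv track=rewrite | github.com/jylEcho/PathMem | code/KG-constraction/io_utils.py | export_feature_index
-- ===== SOURCE A (Python) =====
-- from typing import Dict, List, Set, Tuple, Any
--
-- def export_feature_index(triples: Set[Tuple[str, str, str]]) -> Dict[str, List[str]]:
--     index: Dict[str, List[str]] = {}
--     for h, r, t in triples:
--         if r.startswith("HAS_"):
--             index.setdefault(t, []).append(h)
--     for t in index:
--         index[t] = sorted(set(index[t]))
--     return index
-- ===== SOURCE B (Python) =====
-- def export_feature_index(triples):
--     has = [(h, t) for h, r, t in triples if r.startswith("HAS_")]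
--     tails = []
--     for _, t in has:
--         if t not in tails:
--             tails.append(t)
--     return {t: sorted({h for h, t2 in has if t2 == t}) for t in tails}
-- ===== Notes on version B (the rewrite author's own statement) =====
-- stated objective: alternative
-- what changed: B builds no grouping dict at all: it filters the HAS_ pairs once, computes the distinct tails in first-appearance order as a plain list, and then produces the result by one comprehension that rescans the pair list per tail (nested scans instead of A's setdefault/append hash-grouping plus a second in-place rewrite loop).
import Mathlib
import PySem

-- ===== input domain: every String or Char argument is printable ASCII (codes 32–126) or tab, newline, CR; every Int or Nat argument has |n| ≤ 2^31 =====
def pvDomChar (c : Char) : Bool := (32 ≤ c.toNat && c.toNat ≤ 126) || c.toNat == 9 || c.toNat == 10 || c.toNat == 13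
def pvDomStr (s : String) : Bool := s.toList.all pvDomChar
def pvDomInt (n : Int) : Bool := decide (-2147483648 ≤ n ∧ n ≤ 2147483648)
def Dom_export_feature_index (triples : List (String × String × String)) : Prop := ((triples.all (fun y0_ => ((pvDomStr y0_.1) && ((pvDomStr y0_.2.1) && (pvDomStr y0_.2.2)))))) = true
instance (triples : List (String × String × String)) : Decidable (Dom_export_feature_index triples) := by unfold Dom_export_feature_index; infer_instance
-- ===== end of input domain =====

-- B builds no grouping dict: it filters the HAS_ pairs once, lists the distinct tails in
-- first-appearance order, and emits the result by one comprehension that rescans the pair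
-- list per tail (objective: alternative decomposition; not claimed faster).


-- ===== PORT A =====
def export_feature_index (triples : List (String × String × String)) : List (String × List String) :=
  -- for h, r, t in triples: if r.startswith("HAS_"): index.setdefault(t, []).append(h)
  let index : PySem.Dict String (List String) :=
    triples.foldl (fun index hrt =>
      if PySem.Str.startswith hrt.2.1 "HAS_" then
        index.modify hrt.2.2 [] (fun l => l ++ [hrt.1])   -- setdefault(t, []).append(h)
      else index) PySem.Dict.empty
  -- for t in index: index[t] = sorted(set(index[t]))   (t is always present; getD's default is never used)
  let index2 : PySem.Dict String (List String) :=
    index.keys.foldl (fun d t =>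
      d.insert t (PySem.List.sorted (PySem.Set.ofList (d.getD t [])) (fun x => x) false)) index
  index2.items

-- ===== PORT B =====
def export_feature_index_alt (triples : List (String × String × String)) : List (String × List String) :=
  -- has = [(h, t) for h, r, t in triples if r.startswith("HAS_")]
  let has : List (String × String) :=
    triples.filterMap (fun hrt =>
      if PySem.Str.startswith hrt.2.1 "HAS_" then some (hrt.1, hrt.2.2) else none)
  -- tails = []; for _, t in has: if t not in tails: tails.append(t)
  let tails : List String :=
    has.foldl (fun ts ht => if ts.contains ht.2 then ts else ts ++ [ht.2]) []
  -- {t: sorted({h for h, t2 in has if t2 == t}) for t in tails}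
  tails.map (fun t =>
    (t, PySem.List.sorted
          (PySem.Set.ofList (has.filterMap (fun ht => if ht.2 == t then some ht.1 else none)))
          (fun x => x) false))

-- ===== PRECONDITION & SPEC =====
def Spec_export_feature_index (triples : List (String × String × String)) (out : List (String × List String)) : Prop := out = export_feature_index_alt triples
instance (triples : List (String × String × String)) (out : List (String × List String)) : Decidable (Spec_export_feature_index triples out) := by unfold Spec_export_feature_index; infer_instance

-- ===== CLAIM (what is proved, stated in full; the proofs are below) =====
def Claim_equal_export_feature_index : Prop := ∀ (triples : List (String × String × String)), Dom_export_feature_index triples → Spec_export_feature_index triples (export_feature_index triples)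

-- ===== LEMMAS AND PROOFS =====

-- A's guarded fold over triples is the fold of the per-pair step over the filtered (t, h) list
theorem pvRedA (triples : List (String × String × String)) (d : PySem.Dict String (List String)) :
    triples.foldl (fun index hrt =>
      if PySem.Str.startswith hrt.2.1 "HAS_" then
        index.modify hrt.2.2 [] (fun l => l ++ [hrt.1])
      else index) d =
    (triples.filterMap (fun hrt =>
        if PySem.Str.startswith hrt.2.1 "HAS_" then some (hrt.2.2, hrt.1) else none)).foldl
      (fun index p => index.modify p.1 [] (fun l => l ++ [p.2])) d := by
  induction triples generalizing d with
  | nil => rfl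
  | cons hrt rest ih =>
    by_cases hs : PySem.Str.startswith hrt.2.1 "HAS_"
    · simp only [List.foldl_cons, List.filterMap_cons, hs, if_pos, ih]
    · simp only [List.foldl_cons, List.filterMap_cons, hs, if_neg, Bool.false_eq_true,
        not_false_iff, ih]

-- the filtered (t, h) list is the swap of B's (h, t) list
theorem pvSwap (triples : List (String × String × String)) :
    triples.filterMap (fun hrt =>
      if PySem.Str.startswith hrt.2.1 "HAS_" then some (hrt.2.2, hrt.1) else none) =
    (triples.filterMap (fun hrt =>
      if PySem.Str.startswith hrt.2.1 "HAS_" then some (hrt.1, hrt.2.2) else none)).map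
      (fun p => (p.2, p.1)) := by
  induction triples with
  | nil => rfl
  | cons hrt rest ih =>
    rw [List.filterMap_cons, List.filterMap_cons]
    cases hs : PySem.Str.startswith hrt.2.1 "HAS_" <;> simp <;> simp at ih <;> exact ih

-- B's per-tail head comprehension as filter-then-project
theorem pvHeads (has : List (String × String)) (t : String) :
    has.filterMap (fun ht => if ht.2 == t then some ht.1 else none) =
    ((has.map (fun p => (p.2, p.1))).filter (fun p => p.1 == t)).map (fun p => p.2) := by
  induction has with
  | nil => rfl
  | cons ht rest ih =>
    rw [List.filterMap_cons, List.map_cons, List.filter_cons]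
    cases h : ht.2 == t <;> simp <;> simp at ih <;> exact ih

-- A's second loop rewrites each existing key's value in place
theorem pvUpdateAll (g : List String → List String) :
    ∀ (l : List String) (d : PySem.Dict String (List String)), l.Nodup → d.keys.Nodup →
    (∀ k ∈ l, d.contains k = true) →
    (l.foldl (fun d t => d.insert t (g (d.getD t []))) d).items =
      d.items.map (fun p => if p.1 ∈ l then (p.1, g p.2) else p) := by
  intro l
  induction l with
  | nil => intro d _ _ _; simp
  | cons t rest ih =>
    intro d hnd hk hmem
    have hct : d.contains t = true := hmem t List.mem_cons_self
    have htr : t ∉ rest := (List.nodup_cons.mp hnd).1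
    have h1 : (d.insert t (g (d.getD t []))).items =
        d.items.map (fun p => if p.1 = t then (p.1, g p.2) else p) := by
      rw [PySem.Dict.items_insert_of_contains _ _ hct]
      apply List.map_congr_left
      intro p hp
      by_cases hpt : p.1 = t
      · have : d.getD t [] = p.2 := by
          subst hpt
          exact PySem.Dict.getD_of_mem_items d hp hk []
        simp [hpt, this]
      · simp [hpt]
    have hkeys : (d.insert t (g (d.getD t []))).keys = d.keys :=
      PySem.Dict.keys_insert_of_contains d _ hct
    have hmem' : ∀ k ∈ rest, (d.insert t (g (d.getD t []))).contains k = true := by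
      intro k hkr
      rw [PySem.Dict.contains_iff_mem_keys, hkeys, ← PySem.Dict.contains_iff_mem_keys]
      exact hmem k (List.mem_cons_of_mem _ hkr)
    rw [List.foldl_cons, ih _ hnd.of_cons (by rw [hkeys]; exact hk) hmem', h1, List.map_map]
    apply List.map_congr_left
    intro p _
    by_cases hpt : p.1 = t
    · simp [Function.comp, hpt, htr]
    · by_cases hpr : p.1 ∈ rest <;> simp [Function.comp, hpt, hpr]

-- ===== VERDICT (by name: the statement is the Claim_ definition above) =====
theorem export_feature_index_spec : Claim_equal_export_feature_index := by
  intro triples _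
  unfold Spec_export_feature_index
  simp only [export_feature_index, export_feature_index_alt]
  rw [pvRedA]
  set has : List (String × String) := triples.filterMap (fun hrt =>
      if PySem.Str.startswith hrt.2.1 "HAS_" then some (hrt.1, hrt.2.2) else none) with hhas
  rw [pvSwap triples, ← hhas]
  set ps : List (String × String) := has.map (fun p => (p.2, p.1)) with hps
  set dA : PySem.Dict String (List String) :=
    ps.foldl (fun index p => index.modify p.1 [] (fun l => l ++ [p.2])) PySem.Dict.empty with hdA
  -- keys of dA
  have hkeys : dA.keys = PySem.Set.ofList (ps.map (fun p => p.1)) := by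
    have hk0 := PySem.Dict.keys_foldl_modify_key (κ := String) (ν := List String) ps
      (fun p => p.1) [] (fun _ p => fun l => l ++ [p.2]) PySem.Dict.empty
    simp only [PySem.Dict.keys_empty, PySem.Set.update_nil_left] at hk0
    exact hk0
  have hnd : dA.keys.Nodup := by rw [hkeys]; exact PySem.Set.nodup_ofList _
  -- the value stored at each key
  have hval : ∀ t, dA.getD t [] = (ps.filter (fun p => p.1 == t)).map (fun p => p.2) := by
    intro t
    rw [hdA, PySem.Dict.getD_foldl_modify_append]
    simp
  -- B's tails equal dA.keys
  have htails : has.foldl (fun ts ht => if ts.contains ht.2 then ts else ts ++ [ht.2]) [] =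
      dA.keys := by
    rw [hkeys, hps, List.map_map]
    have : (has.map ((fun p : String × String => p.1) ∘ (fun p : String × String => (p.2, p.1))))
        = has.map (fun p => p.2) := by simp [Function.comp]
    rw [this, ← PySem.Set.update_nil_left,
      PySem.Set.update_map_eq_foldl_add (f := fun p : String × String => p.2)]
    rfl
  rw [htails]
  -- rewrite A's second loop
  rw [pvUpdateAll (fun v => PySem.List.sorted (PySem.Set.ofList v) (fun x => x) false)
      dA.keys dA hnd hnd (fun k hk => (PySem.Dict.contains_iff_mem_keys dA k).mpr hk),
      PySem.Dict.items_eq_map_keys dA hnd [], List.map_map]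
  apply List.map_congr_left
  intro t ht
  simp only [Function.comp, ht, if_pos]
  rw [hval t, pvHeads has t, ← hps]
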